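-- pv_equiv track=rewrite | github.com/ywchen-tw/OCO_spectral_mitigation | src/autoresearch_search.py | _ensure_transformer_head_compat
-- ===== SOURCE A (Python) =====
-- from typing import Any
--
-- def _ensure_transformer_head_compat(config: dict[str, Any]) -> dict[str, Any]:
--     """Ensure sampled transformer configs satisfy d_token % n_heads == 0.
--
--     The model constructor requires embed_dim to be divisible by num_heads.
--     Search spaces may sample invalid pairs independently, so we repair them
--     deterministically before writing search configs.
--     """
--     fixed = dict(config)
--     d_token = int(fixed.get("d_token", 128))
--     n_heads = int(fixed.get("n_heads", 8))
--
--     if n_heads <= 0: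
--         n_heads = 1
--
--     if d_token % n_heads != 0:
--         divisors = [h for h in range(1, min(d_token, 32) + 1) if d_token % h == 0]
--         if not divisors:
--             n_heads = 1
--         else:
--             at_most = [h for h in divisors if h <= n_heads]
--             if at_most:
--                 n_heads = max(at_most)
--             else:
--                 n_heads = min(divisors)
--
--     fixed["d_token"] = d_token
--     fixed["n_heads"] = n_heads
--     return fixed
-- ===== SOURCE B (Python) =====
-- def _ensure_transformer_head_compat(config):
--     """Repair sampled transformer configs so d_token % n_heads == 0."""
--     fixed = dict(config)
--     d_token = int(fixed.get("d_token", 128))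
--     n_heads = int(fixed.get("n_heads", 8))
--     if n_heads <= 0:
--         n_heads = 1
--     if d_token % n_heads != 0:
--         h = min(n_heads, d_token, 32)
--         while h >= 1 and d_token % h != 0:
--             h -= 1
--         n_heads = h if h >= 1 else 1
--     fixed["d_token"] = d_token
--     fixed["n_heads"] = n_heads
--     return fixed
-- ===== Notes on version B (the rewrite author's own statement) =====
-- stated objective: simpler
-- what changed: Replaces building the full divisor list plus the at_most/min-vs-max selection with a single downward scan from min(n_heads, d_token, 32) that stops at the first divisor (falling back to 1 when the scan range is empty).
import Mathlib
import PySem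

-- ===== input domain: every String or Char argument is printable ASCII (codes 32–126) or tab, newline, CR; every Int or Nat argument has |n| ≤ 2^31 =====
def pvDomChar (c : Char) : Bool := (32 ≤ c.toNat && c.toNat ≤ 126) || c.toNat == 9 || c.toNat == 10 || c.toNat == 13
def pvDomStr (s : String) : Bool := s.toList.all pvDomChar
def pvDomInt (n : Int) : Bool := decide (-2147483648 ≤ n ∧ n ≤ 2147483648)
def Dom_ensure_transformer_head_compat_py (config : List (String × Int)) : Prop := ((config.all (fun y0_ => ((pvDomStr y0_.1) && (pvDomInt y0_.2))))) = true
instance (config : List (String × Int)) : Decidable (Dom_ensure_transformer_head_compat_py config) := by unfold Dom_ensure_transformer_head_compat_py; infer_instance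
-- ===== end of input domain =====

-- B replaces A's divisor-list construction and at_most/min-vs-max selection by a single
-- downward scan stopping at the first divisor (objective: simpler).

-- ===== PORT A =====
def ensure_transformer_head_compat_py (config : List (String × Int)) : List (String × Int) :=
  let fixed := PySem.Dict.ofList config
  let d_token := PySem.Dict.getD fixed "d_token" 128
  let n_heads := PySem.Dict.getD fixed "n_heads" 8
  let n_heads := if n_heads ≤ 0 then 1 else n_heads
  let n_heads :=
    if PySem.Int.mod d_token n_heads ≠ 0 then
      let divisors := (PySem.List.pyRange 1 (min d_token 32 + 1) 1).filter
        (fun h => decide (PySem.Int.mod d_token h = 0))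
      if divisors.isEmpty then 1
      else
        let at_most := divisors.filter (fun h => decide (h ≤ n_heads))
        if !at_most.isEmpty then (PySem.List.max? at_most (fun y => y)).getD 0
        else (PySem.List.min? divisors (fun y => y)).getD 0
    else n_heads
  let fixed := PySem.Dict.insert fixed "d_token" d_token
  let fixed := PySem.Dict.insert fixed "n_heads" n_heads
  fixed.items

-- ===== PORT B =====
-- the 'while h >= 1 and d_token % h != 0: h -= 1' loop of Source B
def pvFindH (d : Int) (h : Int) : Int :=
  if hh : 1 ≤ h then
    if PySem.Int.mod d h = 0 then h else pvFindH d (h - 1)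
  else h
termination_by h.toNat
decreasing_by omega

def ensure_transformer_head_compat_py_alt (config : List (String × Int)) : List (String × Int) :=
  let fixed := PySem.Dict.ofList config
  let d_token := PySem.Dict.getD fixed "d_token" 128
  let n_heads := PySem.Dict.getD fixed "n_heads" 8
  let n_heads := if n_heads ≤ 0 then 1 else n_heads
  let n_heads :=
    if PySem.Int.mod d_token n_heads ≠ 0 then
      let h := pvFindH d_token (min n_heads (min d_token 32))
      if 1 ≤ h then h else 1
    else n_heads
  let fixed := PySem.Dict.insert fixed "d_token" d_token
  let fixed := PySem.Dict.insert fixed "n_heads" n_heads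
  fixed.items

-- ===== PRECONDITION & SPEC =====
def Spec_ensure_transformer_head_compat_py (config : List (String × Int)) (out : List (String × Int)) : Prop := out = ensure_transformer_head_compat_py_alt config
instance (config : List (String × Int)) (out : List (String × Int)) : Decidable (Spec_ensure_transformer_head_compat_py config out) := by unfold Spec_ensure_transformer_head_compat_py; infer_instance

-- ===== CLAIM (what is proved, stated in full; the proofs are below) =====
def Claim_equal_ensure_transformer_head_compat_py : Prop := ∀ (config : List (String × Int)), Dom_ensure_transformer_head_compat_py config → Spec_ensure_transformer_head_compat_py config (ensure_transformer_head_compat_py config)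

-- ===== LEMMAS AND PROOFS =====

-- the downward scan computes the greatest divisor of d in 1..c
theorem scan_max (d : Int) : ∀ (k : Nat) (c : Int), 1 ≤ c → c = (k : Int) + 1 →
    PySem.List.max? ((PySem.List.pyRange 1 (c+1) 1).filter
        (fun h => decide (PySem.Int.mod d h = 0))) (fun y => y) = some (pvFindH d c)
      ∧ 1 ≤ pvFindH d c := by
  intro k
  induction k with
  | zero =>
      intro c _ hc1
      have hc : c = 1 := by omega
      subst hc
      rw [show (1:Int)+1 = 2 by norm_num, show PySem.List.pyRange 1 2 1 = [1] from PySem.List.pyRange_one_singleton 1]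
      simp [pvFindH, PySem.List.max?]
  | succ k ih =>
      intro c hc1 hck
      by_cases hdc : PySem.Int.mod d c = 0
      · -- c itself divides: scan stops at c; c is the max of the filtered range
        have hfind : pvFindH d c = c := by rw [pvFindH]; simp [hc1, hdc]
        refine ⟨?_, by omega⟩
        rw [hfind]
        set L := (PySem.List.pyRange 1 (c+1) 1).filter (fun h => decide (PySem.Int.mod d h = 0)) with hL
        have hcL : c ∈ L := by
          rw [hL]; simp [List.mem_filter, PySem.List.mem_pyRange_one, hdc]; omega
        have hne : L ≠ [] := fun h => by simp [h] at hcL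
        obtain ⟨m, hm⟩ : ∃ m, PySem.List.max? L (fun y => y) = some m := by
          cases h : PySem.List.max? L (fun y => y) with
          | none => exact absurd ((PySem.List.max?_eq_none_iff L (fun y => y)).mp h) hne
          | some m => exact ⟨m, rfl⟩
        have hmem := PySem.List.max?_mem hm
        have hmle : m ≤ c := by
          rw [hL] at hmem
          have := (List.mem_filter.mp hmem).1
          rw [PySem.List.mem_pyRange_one] at this; omega
        have hcle : c ≤ m := PySem.List.max?_isMax hm c hcL
        rw [hm]; congr 1; omega
      · -- c does not divide: drop c from the range; scan continues at c-1
        have hfind : pvFindH d c = pvFindH d (c-1) := by rw [pvFindH]; simp [hc1, hdc]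
        have hk1 : 1 ≤ c - 1 := by push_cast at hck; omega
        have hsplit : PySem.List.pyRange 1 (c+1) 1 = PySem.List.pyRange 1 c 1 ++ [c] :=
          PySem.List.pyRange_one_succ_right (by omega)
        have := ih (c-1) hk1 (by push_cast at hck ⊢; omega)
        rw [hfind]
        refine ⟨?_, this.2⟩
        rw [hsplit, List.filter_append]
        simpa [hdc, show c - 1 + 1 = c by ring] using this.1

-- restricting the divisor range 1..m to divisors ≤ n is the range 1..min n m
theorem filter_le_range (n m : Int) (P : Int → Bool) :
    ((PySem.List.pyRange 1 (m+1) 1).filter P).filter (fun h => decide (h ≤ n)) =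
    (PySem.List.pyRange 1 (min n m + 1) 1).filter P := by
  by_cases hnm : m ≤ n
  · have : min n m = m := by omega
    rw [this]
    have : ∀ x ∈ (PySem.List.pyRange 1 (m+1) 1).filter P, (fun h => decide (h ≤ n)) x = true := by
      intro x hx
      have := (List.mem_filter.mp hx).1
      rw [PySem.List.mem_pyRange_one] at this
      simp; omega
    exact List.filter_eq_self.mpr this
  · have hmin : min n m = n := by omega
    rw [hmin]
    by_cases hn1 : 0 ≤ n
    · have hsplit : PySem.List.pyRange 1 (m+1) 1 =
          PySem.List.pyRange 1 (n+1) 1 ++ PySem.List.pyRange (n+1) (m+1) 1 :=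
        PySem.List.pyRange_one_append 1 (n+1) (m+1) (by omega) (by omega)
      rw [hsplit, List.filter_append, List.filter_append]
      have h1 : ((PySem.List.pyRange 1 (n+1) 1).filter P).filter (fun h => decide (h ≤ n)) =
          (PySem.List.pyRange 1 (n+1) 1).filter P := by
        apply List.filter_eq_self.mpr
        intro x hx
        have := (List.mem_filter.mp hx).1
        rw [PySem.List.mem_pyRange_one] at this
        simp; omega
      have h2 : ((PySem.List.pyRange (n+1) (m+1) 1).filter P).filter (fun h => decide (h ≤ n)) = [] := by
        apply List.filter_eq_nil_iff.mpr
        intro x hx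
        have := (List.mem_filter.mp hx).1
        rw [PySem.List.mem_pyRange_one] at this
        simp; omega
      rw [h1, h2, List.append_nil]
    · have h0 : PySem.List.pyRange 1 (n+1) 1 = [] := PySem.List.pyRange_one_eq_nil (by omega)
      rw [h0]
      apply List.filter_eq_nil_iff.mpr
      intro x hx
      have := (List.mem_filter.mp hx).1
      rw [PySem.List.mem_pyRange_one] at this
      simp; omega

-- the selection cores of A and of B agree for n ≥ 1
theorem core_eq (d n : Int) (hn : 1 ≤ n) (_hmod : PySem.Int.mod d n ≠ 0) :
    (let divisors := (PySem.List.pyRange 1 (min d 32 + 1) 1).filter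
        (fun h => decide (PySem.Int.mod d h = 0))
     if divisors.isEmpty then 1
     else
       let at_most := divisors.filter (fun h => decide (h ≤ n))
       if !at_most.isEmpty then (PySem.List.max? at_most (fun y => y)).getD 0
       else (PySem.List.min? divisors (fun y => y)).getD 0) =
    (let h := pvFindH d (min n (min d 32))
     if 1 ≤ h then h else 1) := by
  by_cases hd : 1 ≤ d
  · -- d ≥ 1: divisors and at_most both contain 1
    have hm1 : 1 ≤ min d 32 := by omega
    have h1mem : (1:Int) ∈ (PySem.List.pyRange 1 (min d 32 + 1) 1).filter
        (fun h => decide (PySem.Int.mod d h = 0)) := by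
      simp [List.mem_filter, PySem.List.mem_pyRange_one]; omega
    have hdivne : ((PySem.List.pyRange 1 (min d 32 + 1) 1).filter
        (fun h => decide (PySem.Int.mod d h = 0))).isEmpty = false := by
      rw [List.isEmpty_eq_false_iff]
      exact fun h => by simp [h] at h1mem
    have h1am : (1:Int) ∈ ((PySem.List.pyRange 1 (min d 32 + 1) 1).filter
        (fun h => decide (PySem.Int.mod d h = 0))).filter (fun h => decide (h ≤ n)) := by
      rw [List.mem_filter]; exact ⟨h1mem, by simp; omega⟩
    have hamne : (((PySem.List.pyRange 1 (min d 32 + 1) 1).filter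
        (fun h => decide (PySem.Int.mod d h = 0))).filter (fun h => decide (h ≤ n))).isEmpty = false := by
      rw [List.isEmpty_eq_false_iff]
      exact fun h => by simp [h] at h1am
    simp only [hdivne, hamne, Bool.false_eq_true, if_false, Bool.not_false, if_true]
    have hc1 : 1 ≤ min n (min d 32) := by omega
    obtain ⟨k, hk⟩ : ∃ k : Nat, min n (min d 32) = (k : Int) + 1 :=
      ⟨(min n (min d 32) - 1).toNat, by omega⟩
    have hscan := scan_max d k (min n (min d 32)) hc1 hk
    rw [filter_le_range n (min d 32) (fun h => decide (PySem.Int.mod d h = 0))]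
    rw [hscan.1]
    have := hscan.2
    simp [this]
  · -- d ≤ 0: divisor range empty, scan range nonpositive: both sides give 1
    have hre : PySem.List.pyRange 1 (min d 32 + 1) 1 = [] :=
      PySem.List.pyRange_one_eq_nil (by omega)
    have hcap : min n (min d 32) ≤ 0 := by omega
    have hfh : pvFindH d (min n (min d 32)) = min n (min d 32) := by
      rw [pvFindH]; simp; omega
    rw [hre]
    simp [hfh]
    omega

-- ===== VERDICT (by name: the statement is the Claim_ definition above) =====
theorem ensure_transformer_head_compat_py_spec : Claim_equal_ensure_transformer_head_compat_py := by
  intro config _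
  unfold Spec_ensure_transformer_head_compat_py
  unfold ensure_transformer_head_compat_py ensure_transformer_head_compat_py_alt
  dsimp only
  congr 2
  set d := PySem.Dict.getD (PySem.Dict.ofList config) "d_token" 128 with hd
  set n0 := PySem.Dict.getD (PySem.Dict.ofList config) "n_heads" 8 with hn0
  set n := if n0 ≤ 0 then 1 else n0 with hn
  have hn1 : 1 ≤ n := by rw [hn]; split <;> omega
  by_cases hmod : PySem.Int.mod d n = 0
  · simp [hmod]
  · have h := core_eq d n hn1 hmod
    dsimp only at h
    simpa [hmod] using h
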